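-- pv_equiv track=rewrite | github.com/Lijuet/Algo-ITzi | Brute-Force/prog-60057.py | solution
-- ===== SOURCE A (Python) =====
-- from math import ceil
--
-- def solution(s):
--     answer = 0
--     sl = len(s)
--
--     for l in range(1, sl // 2 + 1):
--         pre = s[:l]
--         wcnt, tcnt = 1, 0
--         for i in range(1, ceil(sl / l) + 1):
--             cur = s[l * i:min(l * (i + 1), sl)] if l * i < sl else None
--             if cur == pre:  wcnt += 1
--             else:
--                 tcnt += len(pre) + (len(str(wcnt)) if wcnt != 1 else 0)
--                 wcnt = 1
--             pre = cur
--         if tcnt > answer : answer = tcnt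
--
--     return answer
-- ===== SOURCE B (Python) =====
-- def solution(s):
--     n = len(s)
--     best = 0
--     for l in range(1, n // 2 + 1):
--         full = n // l
--         # break boundaries: chunk i starts a new run iff some character in the
--         # previous chunk disagrees with the character one period later
--         breaks = [i for i in range(1, full)
--                   if any(s[p] != s[p + l] for p in range((i - 1) * l, i * l))]
--         edges = [0] + breaks + [full]
--         total = n - full * l  # the short tail chunk is always its own run
--         for a, b in zip(edges, edges[1:]):
--             k = b - a
--             total += l + (len(str(k)) if k > 1 else 0)
--         if total > best:
--             best = total
--     return best
-- ===== Notes on version B (the rewrite author's own statement) =====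
-- stated objective: alternative
-- what changed: A streams the chunk sequence through a pre/wcnt/tcnt state machine with a None sentinel and an extra flush iteration; B never builds or compares chunks at all: per block size it finds the break boundaries by character-level period comparisons s[p]!=s[p+l], then computes the compressed length arithmetically from the gaps between consecutive break indices (plus the short tail chunk as its own run).
import Mathlib
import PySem

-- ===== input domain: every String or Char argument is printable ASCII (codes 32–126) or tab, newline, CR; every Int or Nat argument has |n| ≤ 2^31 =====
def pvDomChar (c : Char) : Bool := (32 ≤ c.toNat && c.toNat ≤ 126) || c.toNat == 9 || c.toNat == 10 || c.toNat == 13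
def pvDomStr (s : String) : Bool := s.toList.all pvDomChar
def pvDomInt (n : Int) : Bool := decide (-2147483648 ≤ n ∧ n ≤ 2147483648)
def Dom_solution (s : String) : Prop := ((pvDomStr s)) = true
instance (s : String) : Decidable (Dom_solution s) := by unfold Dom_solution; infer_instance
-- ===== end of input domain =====

-- B replaces A's chunk-streaming state machine (pre/wcnt/tcnt with a None sentinel and an
-- extra flush iteration) by a boundary computation: per block size it detects run breaks by
-- character-level period comparisons s[p] != s[p+l] and then derives the compressed length
-- arithmetically from the gaps between consecutive break indices; objective: alternative.

-- ===== PORT A =====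
-- the body of A's inner loop; `pre` is an Option because Python sets cur (hence pre) to None
-- past the end; the `none => 0` arm of len(pre) is unreachable in Python (flush happens
-- before pre can be None) and only makes the match total.
def pvStepA (st : Option (List Char) × Int × Int) (cur : Option (List Char)) :
    Option (List Char) × Int × Int :=
  if cur == st.1 then (cur, st.2.1 + 1, st.2.2)
  else (cur, 1,
    st.2.2 + (match st.1 with | some p => PySem.List.len p | none => 0)
      + (if st.2.1 ≠ 1 then PySem.Str.len (PySem.Int.toStr st.2.1) else 0))

-- cur = s[l*i : min(l*(i+1), sl)] if l*i < sl else None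
def pvCurA (cs : List Char) (sl l i : Int) : Option (List Char) :=
  if l * i < sl then some (PySem.List.slice cs (some (l * i)) (some (min (l * (i + 1)) sl)))
  else none

-- A; math.ceil(sl / l) is ported as the integer ceiling (sl + l - 1) // l, exact at these sizes
def solution (s : String) : Int :=
  let cs := s.toList
  let sl : Int := PySem.List.len cs
  (PySem.List.pyRange 1 (PySem.Int.floordiv sl 2 + 1) 1).foldl (fun answer l =>
    let tcnt :=
      ((PySem.List.pyRange 1 (PySem.Int.floordiv (sl + l - 1) l + 1) 1).foldl
        (fun st i => pvStepA st (pvCurA cs sl l i))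
        (some (PySem.List.slice cs none (some l)), 1, 0)).2.2
    if tcnt > answer then tcnt else answer) 0

-- ===== PORT B =====
-- Source B's break test for chunk index i: any(s[p] != s[p+l] for p in range((i-1)*l, i*l))
def pvMismatch (cs : List Char) (l i : Int) : Bool :=
  (PySem.List.pyRange ((i - 1) * l) (i * l) 1).any (fun p =>
    PySem.List.pyGet? cs p != PySem.List.pyGet? cs (p + l))

def solution_alt (s : String) : Int :=
  let cs := s.toList
  let n : Int := PySem.List.len cs
  (PySem.List.pyRange 1 (PySem.Int.floordiv n 2 + 1) 1).foldl (fun best l =>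
    let full := PySem.Int.floordiv n l
    let breaks := (PySem.List.pyRange 1 full 1).filter (pvMismatch cs l)
    let edges := 0 :: (breaks ++ [full])
    let total := (edges.zip edges.tail).foldl
      (fun t ab => t + l + (if ab.2 - ab.1 > 1 then PySem.Str.len (PySem.Int.toStr (ab.2 - ab.1)) else 0))
      (n - full * l)
    if total > best then total else best) 0

-- ===== PRECONDITION & SPEC =====
def Spec_solution (s : String) (out : Int) : Prop := out = solution_alt s
instance (s : String) (out : Int) : Decidable (Spec_solution s out) := by unfold Spec_solution; infer_instance

-- ===== CLAIM (what is proved, stated in full; the proofs are below) =====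
def Claim_equal_solution : Prop := ∀ (s : String), Dom_solution s → Spec_solution s (solution s)

-- ===== LEMMAS AND PROOFS =====

-- reference run-compression function used only by the proofs: run scan over the chunk list
def pvCompressLen (chunks : List (List Char)) : Int :=
  match chunks with
  | [] => 0
  | h :: t =>
    let k : Int := 1 + ((t.takeWhile (· == h)).length : Int)
    PySem.List.len h + (if k > 1 then PySem.Str.len (PySem.Int.toStr k) else 0)
      + pvCompressLen (t.drop (t.takeWhile (· == h)).length)
termination_by chunks.length
decreasing_by simp [List.length_drop]

-- the chunk s[k*l:(k+1)*l]
def pvChunk (cs : List Char) (l k : Int) : List Char :=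
  PySem.List.slice cs (some (l * k)) (some (l * k + l))

-- the chunk list s[a*l:(a+1)*l], …, s[(q-1)*l:q*l]
def pvChunks (cs : List Char) (l a q : Int) : List (List Char) :=
  (PySem.List.pyRange a q 1).map (pvChunk cs l)

def pvGap (l : Int) (ab : Int × Int) : Int :=
  l + (if ab.2 - ab.1 > 1 then PySem.Str.len (PySem.Int.toStr (ab.2 - ab.1)) else 0)

-- dropWhile is drop of the takeWhile length
theorem pv_dropWhile_eq_drop {α : Type} (p : α → Bool) (t : List α) :
    t.dropWhile p = t.drop (t.takeWhile p).length := by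
  induction t with
  | nil => rfl
  | cons a t ih =>
    by_cases h : p a
    · simp [List.takeWhile_cons, h, ih]
    · simp [List.dropWhile_cons, List.takeWhile_cons, h]

-- the streaming fold of A over (chunks.tail mapped to some, plus the final None flush)
theorem pv_foldA (rest : List (List Char)) : ∀ (p : List Char) (w t : Int),
    ((rest.map some ++ [none]).foldl pvStepA (some p, w, t)).2.2
      = t + PySem.List.len p
        + (let k := w + ((rest.takeWhile (· == p)).length : Int)
           if k ≠ 1 then PySem.Str.len (PySem.Int.toStr k) else 0)
        + pvCompressLen (rest.dropWhile (· == p)) := by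
  induction rest with
  | nil =>
    intro p w t
    simp [pvStepA, pvCompressLen]
  | cons r rest ih =>
    intro p w t
    by_cases h : r = p
    · subst h
      have hstep : pvStepA (some r, w, t) (some r) = (some r, w + 1, t) := by
        simp [pvStepA]
      simp only [List.map_cons, List.cons_append, List.foldl_cons, hstep, ih]
      simp only [List.takeWhile_cons, List.dropWhile_cons, beq_self_eq_true, if_pos,
        List.length_cons]
      push_cast
      ring_nf
    · have hstep : pvStepA (some p, w, t) (some r) =
          (some r, 1, t + PySem.List.len p
            + (if w ≠ 1 then PySem.Str.len (PySem.Int.toStr w) else 0)) := by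
        simp [pvStepA, h]
      simp only [List.map_cons, List.cons_append, List.foldl_cons, hstep, ih]
      have hne : (r == p) = false := by simp [h]
      simp only [List.takeWhile_cons, List.dropWhile_cons, hne]
      simp only [Bool.false_eq_true, if_false, List.length_nil, Nat.cast_zero, add_zero]
      rw [pvCompressLen, ← pv_dropWhile_eq_drop]
      split_ifs
      all_goals try ring
      all_goals exfalso; omega

-- a slice whose upper bound is clamped by min with the length equals the unclamped slice
theorem pv_slice_min (cs : List Char) (a b : Int) (ha : 0 ≤ a) (hab : a ≤ b) :
    PySem.List.slice cs (some a) (some (min b (cs.length : Int)))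
      = PySem.List.slice cs (some a) (some b) := by
  rcases le_or_gt b (cs.length : Int) with hle | hgt
  · rw [min_eq_left hle]
  · rw [min_eq_right hgt.le]
    rw [PySem.List.slice_toNat cs ha (by omega), PySem.List.slice_toNat cs ha (by omega)]
    have hlen : (List.drop a.toNat cs).length = cs.length - a.toNat := List.length_drop ..
    rw [List.take_of_length_le (by omega), List.take_of_length_le (by omega)]

-- per block length l: A's inner loop value = compressLen of the chunk list
theorem pv_inner (cs : List Char) (l : Int) (h1 : 1 ≤ l) (h2 : 2 * l ≤ (cs.length : Int)) :
    ((PySem.List.pyRange 1 (PySem.Int.floordiv ((cs.length : Int) + l - 1) l + 1) 1).foldl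
        (fun st i => pvStepA st (pvCurA cs (cs.length : Int) l i))
        (some (PySem.List.slice cs none (some l)), 1, 0)).2.2
      = pvCompressLen ((PySem.List.pyRange 0 (cs.length : Int) l).map
          (fun i => PySem.List.slice cs (some i) (some (i + l)))) := by
  have hl0 : (0:Int) < l := by omega
  have hn0 : (0:Int) < (cs.length : Int) := by omega
  have hm : PySem.Int.floordiv ((cs.length : Int) + l - 1) l
      = ((cs.length : Int) + l - 1) / l := by
    unfold PySem.Int.floordiv
    rw [Int.fdiv_eq_ediv, if_pos (Or.inl hl0.le)]
    ring
  set q : Int := ((cs.length : Int) + l - 1) / l with hq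
  have hr0 := Int.emod_nonneg ((cs.length : Int) + l - 1) (ne_of_gt hl0)
  have hr1 := Int.emod_lt_of_pos ((cs.length : Int) + l - 1) hl0
  have hde := Int.ediv_add_emod ((cs.length : Int) + l - 1) l
  rw [← hq] at hde
  have hub : (cs.length : Int) ≤ l * q := by omega
  have hlb : l * (q - 1) < (cs.length : Int) := by
    have : l * (q - 1) = l * q - l := by ring
    omega
  have hq2 : 2 ≤ q := by nlinarith
  set mN := q.toNat with hmdef
  have hmN : (mN : Int) = q := Int.toNat_of_nonneg (by omega)
  have hmN2 : 2 ≤ mN := by omega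
  obtain ⟨j, hj⟩ : ∃ j, mN = j + 1 := ⟨mN - 1, by omega⟩
  -- LHS: the loop over i = 1 .. m as A's fold over the list of cur values
  rw [hm, PySem.List.pyRange_one]
  have h1 : (q + 1 - 1).toNat = j + 1 := by omega
  rw [h1, List.foldl_map]
  -- the list of cur values is (tail chunks mapped to some) ++ [none]
  have hlist : (List.range (j + 1)).map (fun k : Nat => pvCurA cs (cs.length : Int) l (1 + k))
      = ((List.range j).map (fun k : Nat =>
            PySem.List.slice cs (some (l * ((k:Int) + 1))) (some (l * ((k:Int) + 1) + l)))).map some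
        ++ [none] := by
    rw [List.range_succ, List.map_append, List.map_map]
    congr 1
    · apply List.map_congr_left
      intro k hk
      rw [List.mem_range] at hk
      have hkq : (1:Int) + k ≤ q - 1 := by omega
      have hlt : l * (1 + (k:Int)) < (cs.length : Int) :=
        lt_of_le_of_lt (by nlinarith) hlb
      simp only [pvCurA, if_pos hlt, Function.comp_apply]
      rw [show l * ((1:Int) + (k:Int) + 1) = l * ((k:Int) + 1) + l from by ring,
          show l * ((1:Int) + (k:Int)) = l * ((k:Int) + 1) from by ring,
          pv_slice_min cs _ _ (by positivity) (by omega)]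
    · simp only [List.map_cons, List.map_nil]
      have hge : ¬ l * (1 + (j:Int)) < (cs.length : Int) := by
        have : (1:Int) + j = q := by omega
        rw [this]
        omega
      simp [pvCurA, hge]
  rw [show (fun (st : Option (List Char) × Int × Int) (k : Nat) =>
        pvStepA st (pvCurA cs (cs.length : Int) l (1 + (k:Int))))
      = (fun st k => pvStepA st ((fun k : Nat => pvCurA cs (cs.length : Int) l (1 + (k:Int))) k))
      from rfl, ← List.foldl_map, hlist, pv_foldA]
  -- RHS: the chunk list, head chunk split off
  rw [PySem.List.pyRange_of_pos 0 (cs.length : Int) hl0, if_pos hn0]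
  simp only [sub_zero, zero_add, ← hq]
  rw [show q.toNat = j + 1 from by omega, List.range_succ_eq_map]
  simp only [List.map_cons, List.map_map, Nat.cast_zero, mul_zero,
    Function.comp_def, Nat.succ_eq_add_one, Nat.cast_add, Nat.cast_one]
  -- normalise the head chunk: s[0 : 0+l] is s[:l]
  have hc0 : PySem.List.slice cs (some 0) (some (0 + l)) = PySem.List.slice cs none (some l) := by
    simp [PySem.List.slice_zero_start]
  rw [hc0, pvCompressLen, ← pv_dropWhile_eq_drop]
  split_ifs
  all_goals try ring
  all_goals exfalso; omega

-- the position-step chunk list is pvChunks from index 0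
theorem pv_chunks_eq (cs : List Char) (l : Int) (h1 : 1 ≤ l) (h2 : 2 * l ≤ (cs.length : Int)) :
    ((PySem.List.pyRange 0 (cs.length : Int) l).map
        (fun i => PySem.List.slice cs (some i) (some (i + l))))
      = pvChunks cs l 0 (((cs.length : Int) + l - 1) / l) := by
  have hl0 : (0:Int) < l := by omega
  have hn0 : (0:Int) < (cs.length : Int) := by omega
  rw [pvChunks, PySem.List.pyRange_of_pos 0 (cs.length : Int) hl0, if_pos hn0,
    PySem.List.pyRange_one, List.map_map, List.map_map]
  have hq : (((cs.length : Int) - 0 + l - 1) / l).toNat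
      = ((((cs.length : Int) + l - 1) / l) - 0).toNat := by norm_num
  rw [hq]
  apply List.map_congr_left
  intro k _
  simp only [Function.comp_apply, pvChunk]
  rw [show (0:Int) + l * (k:Int) = l * (0 + (k:Int)) from by ring]

-- a full chunk (k < n/l) has length l
theorem pv_chunk_len (cs : List Char) (l k : Int) (hl : 1 ≤ l) (h0 : 0 ≤ k)
    (h2 : l * k + l ≤ (cs.length : Int)) :
    ((pvChunk cs l k).length : Int) = l := by
  have ha : (0:Int) ≤ l * k := mul_nonneg (by omega) h0
  unfold pvChunk
  rw [PySem.List.slice_toNat cs ha (by omega)]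
  simp only [List.length_take, List.length_drop]
  omega

-- pvMismatch is chunk inequality, for in-range full chunks
theorem pv_mismatch_iff (cs : List Char) (l i : Int) (hl : 1 ≤ l) (hi : 1 ≤ i)
    (h2 : l * i + l ≤ (cs.length : Int)) :
    pvMismatch cs l i = false ↔ pvChunk cs l (i - 1) = pvChunk cs l i := by
  have hl0 : (0:Int) < l := by omega
  have hcm1 : (i - 1) * l = l * (i - 1) := mul_comm _ _
  have hcm2 : i * l = l * i := mul_comm _ _
  have hlink : l * i = l * (i - 1) + l := by ring
  have hx0 : (0:Int) ≤ l * (i - 1) := mul_nonneg (by omega) (by omega)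
  set A := (l * (i - 1)).toNat with hAdef
  set B := (l * i).toNat with hBdef
  set L := l.toNat with hLdef
  have hA : (A : Int) = l * (i - 1) := Int.toNat_of_nonneg hx0
  have hB : (B : Int) = l * i := Int.toNat_of_nonneg (by omega)
  have hL : (L : Int) = l := Int.toNat_of_nonneg (by omega)
  have hany : pvMismatch cs l i = false ↔
      ∀ p : Int, (i - 1) * l ≤ p → p < i * l →
        PySem.List.pyGet? cs p = PySem.List.pyGet? cs (p + l) := by
    unfold pvMismatch
    rw [List.any_eq_false]
    constructor
    · intro h p h1 h2
      have := h p (PySem.List.mem_pyRange_one.mpr ⟨h1, h2⟩)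
      simpa using this
    · intro h x hx
      rw [PySem.List.mem_pyRange_one] at hx
      simp [h x hx.1 hx.2]
  have hchunk : pvChunk cs l (i - 1) = pvChunk cs l i ↔
      ∀ j : Nat, j < L → cs[A + j]? = cs[B + j]? := by
    unfold pvChunk
    rw [PySem.List.slice_toNat cs hx0 (by omega), PySem.List.slice_toNat cs (by omega) (by omega)]
    have e1 : (l * (i - 1) + l).toNat - (l * (i - 1)).toNat = L := by omega
    have e2 : (l * i + l).toNat - (l * i).toNat = L := by omega
    rw [e1, e2, ← hAdef, ← hBdef]
    constructor
    · intro he j hj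
      have := congrArg (fun t => t[j]?) he
      simpa only [List.getElem?_take, List.getElem?_drop, if_pos hj] using this
    · intro hp
      apply List.ext_getElem?
      intro j
      by_cases hj : j < L
      · simp only [List.getElem?_take, List.getElem?_drop, if_pos hj]
        exact hp j hj
      · simp only [List.getElem?_take, if_neg hj]
  rw [hany, hchunk]
  constructor
  · intro h j hj
    have hjl : (j : Int) < l := by omega
    have hx := h (l * (i - 1) + j) (by omega) (by omega)
    rw [PySem.List.pyGet?_of_nonneg cs (by omega), PySem.List.pyGet?_of_nonneg cs (by omega)] at hx
    rwa [show (l * (i - 1) + (j:Int)).toNat = A + j from by omega,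
      show (l * (i - 1) + (j:Int) + l).toNat = B + j from by omega] at hx
  · intro hc p hp1 hp2
    have hj : (p - l * (i - 1)).toNat < L := by omega
    have := hc (p - l * (i - 1)).toNat hj
    rw [PySem.List.pyGet?_of_nonneg cs (by omega), PySem.List.pyGet?_of_nonneg cs (by omega)]
    rwa [show p.toNat = A + (p - l * (i - 1)).toNat from by omega,
      show (p + l).toNat = B + (p - l * (i - 1)).toNat from by omega]

-- adjacent equality on a break-free stretch propagates to the stretch head
theorem pv_chain (cs : List Char) (l a b : Int) (hl : 1 ≤ l) (ha : 0 ≤ a)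
    (hbF : b ≤ (cs.length : Int) / l)
    (hmm : ∀ i, a + 1 ≤ i → i < b → pvMismatch cs l i = false) :
    ∀ k, a ≤ k → k < b → pvChunk cs l k = pvChunk cs l a := by
  have hl0 : (0:Int) < l := by omega
  have hede := Int.ediv_add_emod (cs.length : Int) l
  have hr0 := Int.emod_nonneg (cs.length : Int) (ne_of_gt hl0)
  have hFl : l * ((cs.length : Int) / l) ≤ (cs.length : Int) := by omega
  have key : ∀ d : Nat, a + (d : Int) < b → pvChunk cs l (a + (d : Int)) = pvChunk cs l a := by
    intro d
    induction d with
    | zero => intro _; norm_num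
    | succ e ihe =>
      intro hlt
      push_cast at hlt
      have hF2 : a + (e : Int) + 2 ≤ (cs.length : Int) / l := by omega
      have hmul := mul_le_mul_of_nonneg_left hF2 (le_of_lt hl0)
      have hbound : l * (a + (e : Int) + 1) + l ≤ (cs.length : Int) := by nlinarith
      have hf := hmm (a + (e : Int) + 1) (by omega) (by omega)
      have heq := (pv_mismatch_iff cs l (a + (e : Int) + 1) hl (by omega) hbound).mp hf
      have hstep : pvChunk cs l (a + (e : Int)) = pvChunk cs l (a + (e : Int) + 1) := by
        have he1 : a + (e : Int) + 1 - 1 = a + (e : Int) := by ring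
        rwa [he1] at heq
      rw [show a + (((e + 1 : Nat)) : Int) = a + (e : Int) + 1 from by push_cast; ring]
      exact hstep.symm.trans (ihe (by omega))
  intro k hk1 hk2
  have := key (k - a).toNat (by omega)
  rwa [show a + (((k - a).toNat : Nat) : Int) = k from by omega] at this

-- head structure of an integer-range filter
theorem pv_filter_head (p : Int → Bool) : ∀ (cnt : Nat) (s e : Int), (e - s).toNat ≤ cnt →
    ∀ {b : Int} {rest : List Int}, (PySem.List.pyRange s e 1).filter p = b :: rest →
    s ≤ b ∧ b < e ∧ p b = true ∧ (∀ i, s ≤ i → i < b → p i = false) ∧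
      rest = (PySem.List.pyRange (b + 1) e 1).filter p := by
  intro cnt
  induction cnt with
  | zero =>
    intro s e hle b rest hf
    have hse : e ≤ s := by omega
    rw [PySem.List.pyRange_one_eq_nil hse] at hf
    simp at hf
  | succ c ih =>
    intro s e hle b rest hf
    by_cases hse : s < e
    · rw [PySem.List.pyRange_one_cons hse, List.filter_cons] at hf
      by_cases hps : p s = true
      · rw [if_pos hps] at hf
        obtain ⟨hb, hrest⟩ := List.cons.inj hf
        subst hb
        exact ⟨le_refl _, hse, hps,
          fun i h1 h2 => absurd (lt_of_le_of_lt h1 h2) (lt_irrefl _), hrest.symm⟩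
      · rw [if_neg hps] at hf
        obtain ⟨h1, h2, h3, h4, h5⟩ := ih (s + 1) e (by omega) hf
        refine ⟨by omega, h2, h3, ?_, h5⟩
        intro i hi1 hi2
        rcases eq_or_lt_of_le hi1 with he | hlt
        · rw [← he]; simpa using hps
        · exact h4 i (by omega) hi2
    · rw [PySem.List.pyRange_one_eq_nil (by omega)] at hf
      simp at hf

theorem pv_filter_nil (p : Int → Bool) (s e : Int)
    (h : (PySem.List.pyRange s e 1).filter p = []) :
    ∀ i, s ≤ i → i < e → p i = false := by
  intro i h1 h2
  have := List.filter_eq_nil_iff.mp h i (by rw [PySem.List.mem_pyRange_one]; exact ⟨h1, h2⟩)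
  simpa using this

-- the first run of a chunk list: replicate-and-append shape of pvCompressLen
theorem pv_compress_rep (K : Nat) (h : List Char) (rest : List (List Char))
    (hr : rest.head? ≠ some h) :
    pvCompressLen (List.replicate (K + 1) h ++ rest)
      = PySem.List.len h
        + (if ((K : Int) + 1) > 1 then PySem.Str.len (PySem.Int.toStr ((K : Int) + 1)) else 0)
        + pvCompressLen rest := by
  have hcons : List.replicate (K + 1) h ++ rest = h :: (List.replicate K h ++ rest) := by
    simp [List.replicate_succ]
  have htwr : rest.takeWhile (· == h) = [] := by
    cases rest with
    | nil => rfl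
    | cons r rs =>
      have hrh : (r == h) = false := by
        apply beq_eq_false_iff_ne.mpr
        intro he
        exact hr (by simp [he])
      simp [List.takeWhile_cons, hrh]
  have htw : (List.replicate K h ++ rest).takeWhile (· == h) = List.replicate K h := by
    rw [List.takeWhile_append]
    simp [List.takeWhile_replicate, htwr]
  rw [hcons, pvCompressLen, htw]
  have hdrop : (List.replicate K h ++ rest).drop (List.replicate K h).length = rest :=
    List.drop_left
  simp only [List.length_replicate] at hdrop ⊢
  rw [hdrop]
  have h1k : (1 : Int) + (K : Int) = (K : Int) + 1 := by ring
  rw [h1k]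

-- the tail chunk list (from index n/l to ceil(n/l)) compresses to n mod l
theorem pv_compress_tail (cs : List Char) (l : Int) (hl : 1 ≤ l)
    (h2 : 2 * l ≤ (cs.length : Int)) :
    pvCompressLen (pvChunks cs l ((cs.length : Int) / l) (((cs.length : Int) + l - 1) / l))
      = (cs.length : Int) - ((cs.length : Int) / l) * l := by
  have hl0 : (0:Int) < l := by omega
  have hede := Int.ediv_add_emod (cs.length : Int) l
  have hr0 := Int.emod_nonneg (cs.length : Int) (ne_of_gt hl0)
  have hr1 := Int.emod_lt_of_pos (cs.length : Int) hl0
  have hcm : ((cs.length : Int) / l) * l = l * ((cs.length : Int) / l) := mul_comm _ _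
  have hQ : ((cs.length : Int) + l - 1) / l
      = ((cs.length : Int) % l + l - 1) / l + (cs.length : Int) / l := by
    have hsplit : (cs.length : Int) + l - 1
        = ((cs.length : Int) % l + l - 1) + ((cs.length : Int) / l) * l := by omega
    rw [hsplit, Int.add_mul_ediv_right _ _ (ne_of_gt hl0)]
  by_cases hr : (cs.length : Int) % l = 0
  · have hz : ((cs.length : Int) % l + l - 1) / l = 0 := by
      rw [hr]
      exact Int.ediv_eq_zero_of_lt (by omega) (by omega)
    have hQle : ((cs.length : Int) + l - 1) / l ≤ (cs.length : Int) / l := by omega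
    unfold pvChunks
    rw [PySem.List.pyRange_one_eq_nil hQle]
    simp [pvCompressLen]
    omega
  · have h1 : ((cs.length : Int) % l + l - 1) / l = 1 := by
      have hsplit : (cs.length : Int) % l + l - 1 = ((cs.length : Int) % l - 1) + 1 * l := by ring
      rw [hsplit, Int.add_mul_ediv_right _ _ (ne_of_gt hl0),
        Int.ediv_eq_zero_of_lt (by omega) (by omega)]
      norm_num
    have hQF1 : ((cs.length : Int) + l - 1) / l = (cs.length : Int) / l + 1 := by omega
    unfold pvChunks
    rw [hQF1, PySem.List.pyRange_one_singleton]
    simp only [List.map_cons, List.map_nil]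
    simp [pvCompressLen]
    unfold pvChunk
    rw [PySem.List.slice_toNat cs (by omega) (by omega)]
    simp only [List.length_take, List.length_drop]
    omega

-- MAIN: compressLen of the chunk suffix from a = gap arithmetic over the break list from a
theorem pv_main (cs : List Char) (l : Int) (hl : 1 ≤ l) (h2 : 2 * l ≤ (cs.length : Int)) :
    ∀ (cnt : Nat) (a : Int), 0 ≤ a → a < (cs.length : Int) / l →
      (((cs.length : Int) / l - a)).toNat ≤ cnt →
      pvCompressLen (pvChunks cs l a (((cs.length : Int) + l - 1) / l))
        = ((cs.length : Int) - ((cs.length : Int) / l) * l)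
          + (((a :: (((PySem.List.pyRange (a + 1) ((cs.length : Int) / l) 1).filter
                (pvMismatch cs l)) ++ [(cs.length : Int) / l])).zip
              (((PySem.List.pyRange (a + 1) ((cs.length : Int) / l) 1).filter
                (pvMismatch cs l)) ++ [(cs.length : Int) / l])).map (pvGap l)).sum := by
  have hl0 : (0:Int) < l := by omega
  have hede := Int.ediv_add_emod (cs.length : Int) l
  have hr0 := Int.emod_nonneg (cs.length : Int) (ne_of_gt hl0)
  have hr1 := Int.emod_lt_of_pos (cs.length : Int) hl0
  have hcm : ((cs.length : Int) / l) * l = l * ((cs.length : Int) / l) := mul_comm _ _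
  have hFl : l * ((cs.length : Int) / l) ≤ (cs.length : Int) := by omega
  have hQ : ((cs.length : Int) + l - 1) / l
      = ((cs.length : Int) % l + l - 1) / l + (cs.length : Int) / l := by
    have hsplit : (cs.length : Int) + l - 1
        = ((cs.length : Int) % l + l - 1) + ((cs.length : Int) / l) * l := by omega
    rw [hsplit, Int.add_mul_ediv_right _ _ (ne_of_gt hl0)]
  have hx0 : (0:Int) ≤ ((cs.length : Int) % l + l - 1) / l :=
    Int.ediv_nonneg (by omega) (le_of_lt hl0)
  have hx1 : ((cs.length : Int) % l + l - 1) / l ≤ 1 := by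
    have hle : ((cs.length : Int) % l + l - 1) / l ≤ (2 * l - 1) / l :=
      Int.ediv_le_ediv hl0 (by omega)
    have h2l : (2 * l - 1) / l = 1 := by
      rw [show 2 * l - 1 = (l - 1) + 1 * l from by ring,
        Int.add_mul_ediv_right _ _ (ne_of_gt hl0),
        Int.ediv_eq_zero_of_lt (by omega) (by omega)]
      norm_num
    omega
  have hFQ : (cs.length : Int) / l ≤ ((cs.length : Int) + l - 1) / l := by omega
  have hQF1 : ((cs.length : Int) + l - 1) / l ≤ (cs.length : Int) / l + 1 := by omega
  have hblock : ∀ b : Int, ∀ a : Int, 0 ≤ a → a < b → b ≤ (cs.length : Int) / l →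
      (∀ i, a + 1 ≤ i → i < b → pvMismatch cs l i = false) →
      pvChunks cs l a (((cs.length : Int) + l - 1) / l)
        = List.replicate (b - a).toNat (pvChunk cs l a)
            ++ pvChunks cs l b (((cs.length : Int) + l - 1) / l) := by
    intro b a h0 hab hbF hnob
    unfold pvChunks
    rw [PySem.List.pyRange_one_append a b _ (by omega) (by omega), List.map_append]
    congr 1
    rw [List.eq_replicate_iff]
    refine ⟨by rw [List.length_map, PySem.List.length_pyRange_one], ?_⟩
    intro x hx
    rw [List.mem_map] at hx
    obtain ⟨k, hk, rfl⟩ := hx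
    rw [PySem.List.mem_pyRange_one] at hk
    exact pv_chain cs l a b hl h0 hbF hnob k hk.1 hk.2
  have hlenfull : ∀ a : Int, 0 ≤ a → a < (cs.length : Int) / l →
      PySem.List.len (pvChunk cs l a) = l := by
    intro a h0 haF
    have h1 : a + 1 ≤ (cs.length : Int) / l := by omega
    have hmul := mul_le_mul_of_nonneg_left h1 (le_of_lt hl0)
    rw [PySem.List.len_eq]
    exact pv_chunk_len cs l a hl h0 (by nlinarith)
  intro cnt
  induction cnt with
  | zero => intro a h0 haF hcnt; exfalso; omega
  | succ c ih =>
    intro a h0 haF hcnt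
    rcases hfe : (PySem.List.pyRange (a + 1) ((cs.length : Int) / l) 1).filter (pvMismatch cs l)
      with _ | ⟨b, rest⟩
    · have hnob := pv_filter_nil _ _ _ hfe
      obtain ⟨K, hK⟩ : ∃ K, ((cs.length : Int) / l - a).toNat = K + 1 :=
        ⟨((cs.length : Int) / l - a).toNat - 1, by omega⟩
      rw [hblock ((cs.length : Int) / l) a h0 haF (le_refl _) hnob, hK]
      have hhead : (pvChunks cs l ((cs.length : Int) / l)
          (((cs.length : Int) + l - 1) / l)).head? ≠ some (pvChunk cs l a) := by
        by_cases hQF : ((cs.length : Int) + l - 1) / l ≤ (cs.length : Int) / l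
        · unfold pvChunks
          rw [PySem.List.pyRange_one_eq_nil hQF]
          simp
        · have hrpos : 1 ≤ (cs.length : Int) % l := by
            by_contra hrz
            have hz : ((cs.length : Int) % l + l - 1) / l = 0 := by
              rw [show (cs.length : Int) % l = 0 from by omega]
              exact Int.ediv_eq_zero_of_lt (by omega) (by omega)
            omega
          have hQe : ((cs.length : Int) + l - 1) / l = (cs.length : Int) / l + 1 := by omega
          unfold pvChunks
          rw [hQe, PySem.List.pyRange_one_singleton]
          simp only [List.map_cons, List.map_nil, List.head?_cons, ne_eq, Option.some.injEq]
          intro hcontra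
          have hlena := hlenfull a h0 haF
          rw [PySem.List.len_eq] at hlena
          have hlenF : ((pvChunk cs l ((cs.length : Int) / l)).length : Int)
              = (cs.length : Int) - l * ((cs.length : Int) / l) := by
            unfold pvChunk
            rw [PySem.List.slice_toNat cs (by omega) (by omega)]
            simp only [List.length_take, List.length_drop]
            omega
          rw [hcontra] at hlenF
          omega
      rw [pv_compress_rep K _ _ hhead, pv_compress_tail cs l hl h2]
      simp only [List.nil_append, List.zip_cons_cons, List.zip_nil_right, List.map_cons,
        List.map_nil, List.sum_cons, List.sum_nil]
      rw [hlenfull a h0 haF, show (K : Int) + 1 = (cs.length : Int) / l - a from by omega]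
      unfold pvGap
      ring
    · obtain ⟨hab', hbF, hpb, hno, hrest⟩ := pv_filter_head (pvMismatch cs l)
        (((cs.length : Int) / l - (a + 1)).toNat) (a + 1) _ (le_refl _) hfe
      obtain ⟨K, hK⟩ : ∃ K, (b - a).toNat = K + 1 := ⟨(b - a).toNat - 1, by omega⟩
      rw [hblock b a h0 (by omega) (le_of_lt hbF) hno, hK]
      have hboundb : l * b + l ≤ (cs.length : Int) := by
        have h1 : b + 1 ≤ (cs.length : Int) / l := by omega
        have hmul := mul_le_mul_of_nonneg_left h1 (le_of_lt hl0)
        nlinarith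
      have hneq : pvChunk cs l b ≠ pvChunk cs l a := by
        have hmmb : ¬ (pvMismatch cs l b = false) := by simp [hpb]
        intro he
        apply hmmb
        rw [pv_mismatch_iff cs l b hl (by omega) hboundb]
        have h1 := pv_chain cs l a b hl h0 (le_of_lt hbF) hno (b - 1) (by omega) (by omega)
        rw [h1, he]
      have hhead : (pvChunks cs l b (((cs.length : Int) + l - 1) / l)).head?
          = some (pvChunk cs l b) := by
        unfold pvChunks
        rw [PySem.List.pyRange_one_cons (by omega)]
        simp
      rw [pv_compress_rep K _ _ (by rw [hhead]; intro hcon; exact hneq (Option.some.inj hcon)),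
        ih b (by omega) hbF (by omega), ← hrest]
      simp only [List.cons_append, List.zip_cons_cons, List.map_cons, List.sum_cons]
      rw [hlenfull a h0 haF, show (K : Int) + 1 = b - a from by omega]
      unfold pvGap
      ring

-- ===== VERDICT (by name: the statement is the Claim_ definition above) =====
theorem solution_spec : Claim_equal_solution := by
  intro s _
  unfold Spec_solution solution solution_alt
  simp only [PySem.List.len_eq]
  apply PySem.List.foldl_congr_mem
  intro acc l hl
  rw [PySem.List.mem_pyRange_one] at hl
  have hfd : PySem.Int.floordiv ((s.toList.length : Int)) 2 = (s.toList.length : Int) / 2 := by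
    unfold PySem.Int.floordiv; rw [Int.fdiv_eq_ediv]; simp
  rw [hfd] at hl
  have h2 : 2 * l ≤ (s.toList.length : Int) := by
    have hde := Int.ediv_add_emod (s.toList.length : Int) 2
    have hm0 := Int.emod_nonneg (s.toList.length : Int) (by norm_num : (2:Int) ≠ 0)
    have hm1 := Int.emod_lt_of_pos (s.toList.length : Int) (by norm_num : (0:Int) < 2)
    omega
  have hl0 : (0:Int) < l := by omega
  have hede := Int.ediv_add_emod (s.toList.length : Int) l
  have hr0 := Int.emod_nonneg (s.toList.length : Int) (ne_of_gt hl0)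
  have hr1 := Int.emod_lt_of_pos (s.toList.length : Int) hl0
  have hF2 : 2 ≤ (s.toList.length : Int) / l := by
    have hFgt : l < l * ((s.toList.length : Int) / l) := by omega
    have h1l : l * 1 < l * ((s.toList.length : Int) / l) := by omega
    have := lt_of_mul_lt_mul_left h1l (le_of_lt hl0)
    omega
  have hfl : PySem.Int.floordiv (s.toList.length : Int) l = (s.toList.length : Int) / l := by
    unfold PySem.Int.floordiv
    rw [Int.fdiv_eq_ediv, if_pos (Or.inl (le_of_lt hl0))]
    ring
  have hmain := pv_main s.toList l hl.1 h2 (((s.toList.length : Int) / l).toNat) 0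
    (le_refl 0) (by omega) (by omega)
  simp only [zero_add] at hmain
  rw [hfl, pv_inner s.toList l hl.1 h2, pv_chunks_eq s.toList l hl.1 h2, hmain]
  rw [show (fun (t : Int) (ab : Int × Int) =>
        t + l + (if ab.2 - ab.1 > 1 then PySem.Str.len (PySem.Int.toStr (ab.2 - ab.1)) else 0))
      = (fun (t : Int) (ab : Int × Int) => t + pvGap l ab) from by
    funext t ab
    unfold pvGap
    ring]
  rw [PySem.List.foldl_add]
  simp only [List.tail_cons]
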